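-- pv_equiv track=rewrite | github.com/indiecosmic/advent-of-code-2019 | solutions/day8.py | create_layers
-- ===== SOURCE A (Python) =====
-- def create_layers(numbers:str, width:int, height:int):
--     layers = []
--     rows = []
--     row = ''
--     for _,number in enumerate(numbers):
--         row += number
--         if len(row) == width:
--             rows.append(row)
--             row = ''
--             if len(rows) == height:
--                 layers.append(rows)
--                 rows = []
--     return layers
-- ===== SOURCE B (Python) =====
-- def create_layers(numbers: str, width: int, height: int):
--     if width <= 0 or height <= 0:
--         return []
--     layer_size = width * height
--     layers = []
--     for k in range(len(numbers) // layer_size):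
--         seg = numbers[k * layer_size:(k + 1) * layer_size]
--         rows = []
--         for _ in range(height):
--             rows.append(seg[:width])
--             seg = seg[width:]
--         layers.append(rows)
--     return layers
-- ===== Notes on version B (the rewrite author's own statement) =====
-- stated objective: faster
-- what changed: Replaces A's character-by-character string accumulation with arithmetic slicing: the number of complete layers is len(numbers)//(width*height), each layer is cut out as one slice and split into rows by width-sized slices, avoiding per-character string concatenation and length checks.
import Mathlib
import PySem

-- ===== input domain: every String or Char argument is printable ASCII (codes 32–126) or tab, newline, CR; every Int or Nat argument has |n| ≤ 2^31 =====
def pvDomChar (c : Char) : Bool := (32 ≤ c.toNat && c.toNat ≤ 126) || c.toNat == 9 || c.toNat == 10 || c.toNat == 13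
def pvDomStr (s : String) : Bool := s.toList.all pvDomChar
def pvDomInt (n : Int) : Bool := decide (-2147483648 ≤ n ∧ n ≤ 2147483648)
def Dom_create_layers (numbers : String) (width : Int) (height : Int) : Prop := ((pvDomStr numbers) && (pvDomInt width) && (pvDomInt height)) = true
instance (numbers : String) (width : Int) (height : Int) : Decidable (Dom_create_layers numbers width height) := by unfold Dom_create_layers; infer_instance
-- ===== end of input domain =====

-- B replaces A's character-by-character accumulation by arithmetic slicing
-- (complete-layer count = len // (width*height), rows cut as width-sized slices);
-- same O(n) cost, different decomposition.

-- ===== PORT A =====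
-- One step of A's for-loop: state = (layers, rows, row); row is kept as the
-- list of its characters (row += number ↦ row ++ [c], len(row) ↦ length).
def clStep (width height : Int) (s : List (List String) × List String × List Char) (c : Char) :
    List (List String) × List String × List Char :=
  let row' := s.2.2 ++ [c]
  if (row'.length : Int) = width then
    let rows' := s.2.1 ++ [String.mk row']
    if (rows'.length : Int) = height then (s.1 ++ [rows'], [], [])
    else (s.1, rows', [])
  else (s.1, s.2.1, row')

def create_layers (numbers : String) (width : Int) (height : Int) : List (List String) :=
  (numbers.toList.foldl (clStep width height) ([], [], [])).1

-- ===== PORT B =====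
-- Inner loop of B: `for _ in range(height): rows.append(seg[:width]); seg = seg[width:]`
-- (seg[:width] / seg[width:] with nonnegative bound = List.take / List.drop).
def clRows (w : Nat) : Nat → List Char → List String
  | 0, _ => []
  | h + 1, seg => String.mk (seg.take w) :: clRows w h (seg.drop w)

-- `len(numbers) // layer_size` with nonnegative operands = Nat division;
-- `numbers[k*ls:(k+1)*ls]` with nonnegative bounds = drop (k*ls) then take ls.
def create_layers_alt (numbers : String) (width : Int) (height : Int) : List (List String) :=
  if width ≤ 0 ∨ height ≤ 0 then []
  else
    let l := numbers.toList
    let w := width.toNat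
    let h := height.toNat
    let ls := w * h
    (List.range (l.length / ls)).map (fun k => clRows w h ((l.drop (k * ls)).take ls))

-- ===== PRECONDITION & SPEC =====
def Spec_create_layers (numbers : String) (width : Int) (height : Int) (out : List (List String)) : Prop := out = create_layers_alt numbers width height
instance (numbers : String) (width : Int) (height : Int) (out : List (List String)) : Decidable (Spec_create_layers numbers width height out) := by unfold Spec_create_layers; infer_instance

-- ===== CLAIM (what is proved, stated in full; the proofs are below) =====
def Claim_equal_create_layers : Prop := ∀ (numbers : String) (width : Int) (height : Int), Dom_create_layers numbers width height → Spec_create_layers numbers width height (create_layers numbers width height)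

-- ===== LEMMAS AND PROOFS =====

-- With width ≤ 0 or height ≤ 0 the layers list never grows.
lemma clStep_fst_nonpos (width height : Int) (hneg : width ≤ 0 ∨ height ≤ 0) :
    ∀ (l : List Char) (L : List (List String)) (R : List String) (row : List Char),
      (List.foldl (clStep width height) (L, R, row) l).1 = L := by
  intro l
  induction l with
  | nil => intro L R row; rfl
  | cons c t ih =>
    intro L R row
    simp only [List.foldl_cons, clStep]
    split_ifs with h1 h2
    · exfalso
      simp only [List.length_append, List.length_cons, List.length_nil] at h1 h2
      omega
    · exact ih L (R ++ [String.mk (row ++ [c])]) []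
    · exact ih L R (row ++ [c])

-- Consuming the rest of one row from state (L, R, row).
lemma clRow_fill (w h : Nat) (hw : 0 < w) :
    ∀ (l row : List Char) (L : List (List String)) (R : List String),
      row.length < w → w ≤ row.length + l.length →
      List.foldl (clStep (w : Int) (h : Int)) (L, R, row) l =
        List.foldl (clStep (w : Int) (h : Int))
          (if R.length + 1 = h
           then (L ++ [R ++ [String.mk (row ++ l.take (w - row.length))]], ([] : List String), ([] : List Char))
           else (L, R ++ [String.mk (row ++ l.take (w - row.length))], ([] : List Char)))
          (l.drop (w - row.length)) := by
  intro l
  induction l with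
  | nil => intro row L R hlt hge; simp at hge; omega
  | cons c t ih =>
    intro row L R hlt hge
    by_cases hfull : row.length + 1 = w
    · have ht : w - row.length = 1 := by omega
      simp only [List.foldl_cons, clStep, ht, List.take_succ_cons, List.take_zero, List.drop_succ_cons, List.drop_zero]
      have h1 : (((row ++ [c]).length : Int)) = (w : Int) := by
        simp only [List.length_append, List.length_cons, List.length_nil]; omega
      rw [if_pos h1]
      by_cases h2 : R.length + 1 = h
      · have h2' : (((R ++ [String.mk (row ++ [c])]).length : Int)) = (h : Int) := by
          simp only [List.length_append, List.length_cons, List.length_nil]; omega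
        rw [if_pos h2', if_pos h2]
      · have h2' : ¬ (((R ++ [String.mk (row ++ [c])]).length : Int)) = (h : Int) := by
          simp only [List.length_append, List.length_cons, List.length_nil]; omega
        rw [if_neg h2', if_neg h2]
    · have h1 : ¬ (((row ++ [c]).length : Int)) = (w : Int) := by
        simp only [List.length_append, List.length_cons, List.length_nil]; omega
      simp only [List.foldl_cons, clStep]
      rw [if_neg h1]
      have hrec := ih (row ++ [c]) L R (by simp; omega) (by simp at hge ⊢; omega)
      rw [hrec]
      have hlc : w - (row ++ [c]).length = w - row.length - 1 := by
        simp only [List.length_append, List.length_cons, List.length_nil]; omega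
      have hs : w - row.length = (w - row.length - 1) + 1 := by omega
      have htk : (row ++ [c]) ++ t.take (w - (row ++ [c]).length) = row ++ (c :: t).take (w - row.length) := by
        rw [hlc, hs, List.take_succ_cons]
        simp
      have hdp : t.drop (w - (row ++ [c]).length) = (c :: t).drop (w - row.length) := by
        rw [hs, List.drop_succ_cons, hlc]
      rw [htk, hdp]

-- Consuming j more full rows (finishing the current layer) from a clean-row state.
lemma clLayer_fill (w h : Nat) (hw : 0 < w) :
    ∀ (j : Nat) (l : List Char) (L : List (List String)) (R : List String),
      1 ≤ j → R.length + j = h → j * w ≤ l.length →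
      List.foldl (clStep (w : Int) (h : Int)) (L, R, ([] : List Char)) l =
        List.foldl (clStep (w : Int) (h : Int)) (L ++ [R ++ clRows w j l], [], []) (l.drop (j * w)) := by
  intro j
  induction j with
  | zero => intro l L R hj; omega
  | succ j' ih =>
    intro l L R _ hR hlen
    have hwl : w ≤ ([] : List Char).length + l.length := by
      simp only [List.length_nil, Nat.zero_add]
      calc w = 1 * w := (Nat.one_mul w).symm
        _ ≤ (j' + 1) * w := Nat.mul_le_mul_right w (by omega)
        _ ≤ l.length := hlen
    have hfill := clRow_fill w h hw l [] L R (by simpa using hw) hwl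
    simp only [List.nil_append, List.length_nil, Nat.sub_zero] at hfill
    rw [hfill]
    by_cases hj' : j' = 0
    · subst hj'
      rw [if_pos (by omega)]
      have hone : clRows w (0 + 1) l = [String.mk (l.take w)] := by simp [clRows]
      rw [hone, Nat.zero_add, Nat.one_mul]
    · rw [if_neg (by omega)]
      have hmul : (j' + 1) * w = j' * w + w := by ring
      have hrec := ih (l.drop w) L (R ++ [String.mk (l.take w)]) (by omega)
        (by simp only [List.length_append, List.length_cons, List.length_nil]; omega)
        (by simp only [List.length_drop]; omega)
      rw [hrec]
      have h1 : (R ++ [String.mk (l.take w)]) ++ clRows w j' (l.drop w) = R ++ clRows w (j' + 1) l := by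
        simp [clRows]
      have h2 : (l.drop w).drop (j' * w) = l.drop ((j' + 1) * w) := by
        rw [List.drop_drop]
        congr 1
        ring
      rw [h1, h2]

-- A leftover shorter than a full layer adds no layer.
lemma clTail (w h : Nat) (hw : 0 < w) :
    ∀ (l : List Char) (L : List (List String)) (R : List String) (row : List Char),
      row.length < w → R.length < h → l.length + row.length + R.length * w < h * w →
      (List.foldl (clStep (w : Int) (h : Int)) (L, R, row) l).1 = L := by
  intro l
  induction l with
  | nil => intro L R row _ _ _; rfl
  | cons c t ih =>
    intro L R row hrow hR hlen
    simp only [List.length_cons] at hlen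
    by_cases hfull : row.length + 1 = w
    · have h1 : (((row ++ [c]).length : Int)) = (w : Int) := by
        simp only [List.length_append, List.length_cons, List.length_nil]; omega
      have hRne : R.length + 1 ≠ h := by
        intro hRh
        have hmul : R.length * w + w = h * w := by
          calc R.length * w + w = (R.length + 1) * w := by ring
            _ = h * w := by rw [hRh]
        omega
      have h2 : ¬ (((R ++ [String.mk (row ++ [c])]).length : Int)) = (h : Int) := by
        simp only [List.length_append, List.length_cons, List.length_nil]; omega
      simp only [List.foldl_cons, clStep]
      rw [if_pos h1, if_neg h2]
      apply ih L (R ++ [String.mk (row ++ [c])]) []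
      · simpa using hw
      · simp only [List.length_append, List.length_cons, List.length_nil]; omega
      · simp only [List.length_append, List.length_cons, List.length_nil, Nat.zero_add]
        have hmul : (R.length + 1) * w = R.length * w + w := by ring
        omega
    · have h1 : ¬ (((row ++ [c]).length : Int)) = (w : Int) := by
        simp only [List.length_append, List.length_cons, List.length_nil]; omega
      simp only [List.foldl_cons, clStep]
      rw [if_neg h1]
      apply ih L R (row ++ [c])
      · simp only [List.length_append, List.length_cons, List.length_nil]; omega
      · exact hR
      · simp only [List.length_append, List.length_cons, List.length_nil]; omega

-- clRows only reads the first w*j characters.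
lemma clRows_take (w : Nat) : ∀ (j : Nat) (l : List Char), clRows w j (l.take (w * j)) = clRows w j l := by
  intro j
  induction j with
  | zero => intro l; rfl
  | succ j' ih =>
    intro l
    have h1 : (l.take (w * (j' + 1))).take w = l.take w := by
      rw [List.take_take]
      congr 1
      have : w * 1 ≤ w * (j' + 1) := Nat.mul_le_mul_left w (by omega)
      omega
    have h2 : (l.take (w * (j' + 1))).drop w = (l.drop w).take (w * j') := by
      rw [List.drop_take]
      congr 1
      have : w * (j' + 1) = w * j' + w := by ring
      omega
    simp only [clRows, h1, h2, ih]

-- Main invariant: from a clean state, the fold appends exactly the complete layers.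
lemma clMain (w h : Nat) (hw : 0 < w) (hh : 0 < h) :
    ∀ (n : Nat) (l : List Char) (L : List (List String)), l.length ≤ n →
      (List.foldl (clStep (w : Int) (h : Int)) (L, [], ([] : List Char)) l).1 =
        L ++ (List.range (l.length / (w * h))).map (fun k => clRows w h ((l.drop (k * (w * h))).take (w * h))) := by
  intro n
  induction n with
  | zero =>
    intro l L hl
    have hl0 : l.length = 0 := by omega
    have hdiv : l.length / (w * h) = 0 := by rw [hl0]; simp
    rw [hdiv]
    simp only [List.range_zero, List.map_nil, List.append_nil]
    have hlnil : l = [] := List.length_eq_zero_iff.mp hl0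
    subst hlnil
    rfl
  | succ n' ih =>
    intro l L hl
    by_cases hsmall : l.length < w * h
    · have hdiv : l.length / (w * h) = 0 := Nat.div_eq_of_lt hsmall
      rw [hdiv]
      simp only [List.range_zero, List.map_nil, List.append_nil]
      apply clTail w h hw l L [] []
      · simpa using hw
      · simpa using hh
      · simp only [List.length_nil, Nat.zero_mul, Nat.add_zero]
        have hcomm : w * h = h * w := Nat.mul_comm w h
        omega
    · push_neg at hsmall
      have hcomm : w * h = h * w := Nat.mul_comm w h
      have hfill := clLayer_fill w h hw h l L [] (by omega)
        (by simp) (by omega)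
      simp only [List.nil_append] at hfill
      rw [hfill]
      have hlen' : (l.drop (h * w)).length ≤ n' := by
        simp only [List.length_drop]
        have : 1 ≤ w * h := Nat.mul_pos hw hh
        omega
      rw [ih (l.drop (h * w)) (L ++ [clRows w h l]) hlen']
      rw [List.append_assoc]
      congr 1
      have hdiv : l.length / (w * h) = (l.drop (h * w)).length / (w * h) + 1 := by
        simp only [List.length_drop]
        rw [Nat.mul_comm h w]
        exact Nat.div_eq_sub_div (Nat.mul_pos hw hh) hsmall
      rw [hdiv, List.range_succ_eq_map]
      simp only [List.map_cons, List.map_map, Nat.zero_mul, List.drop_zero, List.singleton_append]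
      congr 1
      · exact (clRows_take w h l).symm
      · apply List.map_congr_left
        intro k _
        simp only [Function.comp_apply]
        congr 2
        rw [List.drop_drop]
        congr 1
        rw [Nat.succ_eq_add_one]
        ring

-- ===== VERDICT (by name: the statement is the Claim_ definition above) =====
theorem create_layers_spec : Claim_equal_create_layers := by
  unfold Claim_equal_create_layers Spec_create_layers
  intro numbers width height _
  unfold create_layers create_layers_alt
  by_cases hneg : width ≤ 0 ∨ height ≤ 0
  · rw [if_pos hneg]
    exact clStep_fst_nonpos width height hneg numbers.toList [] [] []
  · rw [if_neg hneg]
    push_neg at hneg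
    obtain ⟨h1, h2⟩ := hneg
    have hwc : width = (width.toNat : Int) := (Int.toNat_of_nonneg h1.le).symm
    have hhc : height = (height.toNat : Int) := (Int.toNat_of_nonneg h2.le).symm
    rw [hwc, hhc]
    exact clMain width.toNat height.toNat (by omega) (by omega)
      numbers.toList.length numbers.toList [] (le_refl _)
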